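-- pv_equiv track=rewrite | github.com/tanglie1993/drone | institutions.py | generate_competitive_ranking
-- ===== SOURCE A (Python) =====
-- def generate_competitive_ranking(data, key):
--     """生成竞争性排名（处理并列）"""
--     sorted_items = sorted(data.items(),
--                           key=lambda x: (-x[1][key], x[0]))
--
--     rankings = []
--     prev_value = None
--     current_rank = 1
--     position = 1
--
--     for item in sorted_items:
--         current_value = item[1][key]
--         if prev_value is None:
--             rankings.append((current_rank, [item]))
--             prev_value = current_value
--         else:
--             if current_value == prev_value:
--                 rankings[-1][1].append(item)
--             else:
--                 current_rank = position
--                 rankings.append((current_rank, [item]))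
--             prev_value = current_value
--         position += 1
--
--     # 合并前10名
--     result = []
--     total = 0
--     for rank_group in rankings:
--         group_size = len(rank_group[1])
--         if total + group_size > 10:
--             result.append((rank_group[0], rank_group[1][:10 - total]))
--             break
--         result.append(rank_group)
--         total += group_size
--
--     return result
-- ===== SOURCE B (Python) =====
-- def generate_competitive_ranking(data, key):
--     """生成竞争性排名（处理并列）"""
--     order = sorted(data.items(), key=lambda x: (-x[1][key], x[0]))
--     n = len(order)
--     result = []
--     i = 0
--     while i < n:
--         j = i + 1
--         while j < n and order[j][1][key] == order[i][1][key]: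
--             j += 1
--         if j <= 10:
--             result.append((i + 1, order[i:j]))
--             i = j
--         else:
--             result.append((i + 1, order[i:10]))
--             break
--     return result
-- ===== Notes on version B (the rewrite author's own statement) =====
-- stated objective: simpler
-- what changed: A builds the full ranking with a four-variable state machine (prev value, current rank, position, append-to-last-group) and then runs a second accumulate-and-slice truncation pass over the group list; B makes one two-pointer sweep over the sorted list, scanning each maximal equal-value run and emitting (start+1, run) directly, cutting the run that crosses position 10 and stopping there - no prev/rank/total state and no second pass. Pre_ excludes only inputs where some inner dict lacks the key, on which A raises KeyError while sorting.
import Mathlib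
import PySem

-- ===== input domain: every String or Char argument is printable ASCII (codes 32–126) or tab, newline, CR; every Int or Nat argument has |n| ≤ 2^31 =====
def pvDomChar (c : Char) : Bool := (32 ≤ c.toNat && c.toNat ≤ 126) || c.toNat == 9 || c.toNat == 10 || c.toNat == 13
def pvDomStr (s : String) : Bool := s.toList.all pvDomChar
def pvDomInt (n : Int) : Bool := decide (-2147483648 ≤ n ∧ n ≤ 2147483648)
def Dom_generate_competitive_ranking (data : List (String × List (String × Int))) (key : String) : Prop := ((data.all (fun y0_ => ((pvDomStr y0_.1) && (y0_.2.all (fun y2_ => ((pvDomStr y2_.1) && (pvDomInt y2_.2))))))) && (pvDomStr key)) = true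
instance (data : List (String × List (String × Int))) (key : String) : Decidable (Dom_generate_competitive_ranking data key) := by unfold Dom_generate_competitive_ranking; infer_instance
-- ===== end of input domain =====

-- B replaces A's four-variable state machine plus second truncation pass by a single
-- two-pointer sweep over the sorted list that emits each rank group directly (objective: simpler).

-- x[1][key]: first-match lookup in the inner dict (assoc list). Python raises KeyError when
-- the key is missing; Pre_ excludes those inputs, so the .getD default is never used.
def pvVal (d : List (String × Int)) (key : String) : Int := (d.lookup key).getD 0

-- ===== PORT A =====
-- rankings[-1][1].append(item): append item to the last group's list
def pvAppendLast : List (Int × List (String × List (String × Int))) → (String × List (String × Int)) → List (Int × List (String × List (String × Int)))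
  | [], _ => []
  | [g], it => [(g.1, g.2 ++ [it])]
  | g :: h :: t, it => g :: pvAppendLast (h :: t) it

-- one iteration of A's for-loop; state = (rankings, prev_value, current_rank, position)
def pvStepA (key : String) (st : List (Int × List (String × List (String × Int))) × Option Int × Int × Int) (item : String × List (String × Int)) : List (Int × List (String × List (String × Int))) × Option Int × Int × Int :=
  let rankings := st.1
  let prev_value := st.2.1
  let current_rank := st.2.2.1
  let position := st.2.2.2
  let current_value := pvVal item.2 key
  match prev_value with
  | none => (rankings ++ [(current_rank, [item])], some current_value, current_rank, position + 1)
  | some p =>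
    if current_value = p then (pvAppendLast rankings item, some current_value, current_rank, position + 1)
    else (rankings ++ [(position, [item])], some current_value, position, position + 1)

-- A's second loop: merge the first 10 (with break)
def pvTruncA : List (Int × List (String × List (String × Int))) → Int → List (Int × List (String × List (String × Int)))
  | [], _ => []
  | g :: rest, total =>
    if total + (g.2.length : Int) > 10 then [(g.1, PySem.List.slice g.2 none (some (10 - total)))]
    else g :: pvTruncA rest (total + (g.2.length : Int))

def generate_competitive_ranking (data : List (String × List (String × Int))) (key : String) : List (Int × (List (String × (List (String × Int))))) :=
  let sorted_items := PySem.List.sorted2 data (fun x => -(pvVal x.2 key)) (fun x => x.1)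
  let final := sorted_items.foldl (pvStepA key) ([], none, 1, 1)
  pvTruncA final.1 0

-- ===== PORT B =====
-- Source B's inner while loop: advance j while j < n and order[j][1][key] == v
def pvScan (key : String) (order : List (String × List (String × Int))) (v : Int) (j : Nat) : Nat :=
  if h : j < order.length then
    if pvVal (order[j]).2 key = v then pvScan key order v (j + 1) else j
  else j
  termination_by order.length - j

-- termination fact for the outer loop: pvScan never moves backwards (cited in decreasing_by)
theorem pvScan_ge_aux (key : String) (order : List (String × List (String × Int))) (v : Int) :
    ∀ (m j : Nat), order.length - j ≤ m → j ≤ pvScan key order v j := by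
  intro m
  induction m with
  | zero =>
    intro j hm
    rw [pvScan]
    split
    · omega
    · exact le_refl _
  | succ m ih =>
    intro j hm
    rw [pvScan]
    split
    · split
      · exact le_trans (by omega) (ih (j + 1) (by omega))
      · exact le_refl _
    · exact le_refl _

theorem pvScan_ge (key : String) (order : List (String × List (String × Int))) (v : Int) (j : Nat) :
    j ≤ pvScan key order v j := pvScan_ge_aux key order v (order.length - j) j (le_refl _)

-- Source B's outer while loop over the start index i; Python order[i:j] = (order.drop i).take (j - i)
-- (exact here: 0 ≤ i ≤ j are plain nat indices)
def pvLoopB (key : String) (order : List (String × List (String × Int))) (i : Nat) : List (Int × List (String × List (String × Int))) :=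
  if h : i < order.length then
    let j := pvScan key order (pvVal (order[i]).2 key) (i + 1)
    if j ≤ 10 then ((i : Int) + 1, (order.drop i).take (j - i)) :: pvLoopB key order j
    else [((i : Int) + 1, (order.drop i).take (10 - i))]
  else []
  termination_by order.length - i
  decreasing_by
    have := pvScan_ge key order (pvVal (order[i]).2 key) (i + 1)
    omega

def generate_competitive_ranking_alt (data : List (String × List (String × Int))) (key : String) : List (Int × (List (String × (List (String × Int))))) :=
  pvLoopB key (PySem.List.sorted2 data (fun x => -(pvVal x.2 key)) (fun x => x.1)) 0

-- ===== PRECONDITION & SPEC =====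
-- Python A raises KeyError while sorting when some inner dict lacks `key`; exactly those inputs are excluded.
def Pre_generate_competitive_ranking (data : List (String × List (String × Int))) (key : String) : Prop :=
  ∀ e ∈ data, (e.2.lookup key).isSome = true
instance (data : List (String × List (String × Int))) (key : String) : Decidable (Pre_generate_competitive_ranking data key) := by unfold Pre_generate_competitive_ranking; infer_instance
def pvWitness_generate_competitive_ranking : (List (String × List (String × Int))) × String := ([("a", [("k", 3)]), ("b", [("k", 7)])], "k")

def Spec_generate_competitive_ranking (data : List (String × List (String × Int))) (key : String) (out : List (Int × (List (String × (List (String × Int)))))) : Prop := out = generate_competitive_ranking_alt data key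
instance (data : List (String × List (String × Int))) (key : String) (out : List (Int × (List (String × (List (String × Int)))))) : Decidable (Spec_generate_competitive_ranking data key out) := by unfold Spec_generate_competitive_ranking; infer_instance

-- ===== CLAIM (what is proved, stated in full; the proofs are below) =====
def Claim_equal_generate_competitive_ranking : Prop := ∀ (data : List (String × List (String × Int))) (key : String), Dom_generate_competitive_ranking data key → Pre_generate_competitive_ranking data key → Spec_generate_competitive_ranking data key (generate_competitive_ranking data key)

-- ===== LEMMAS AND PROOFS =====

-- proof-side: length of the maximal prefix of tl whose value equals v
def pvRunLen (key : String) (v : Int) : List (String × List (String × Int)) → Nat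
  | [] => 0
  | x :: tl => if pvVal x.2 key = v then 1 + pvRunLen key v tl else 0

-- proof-side: B's grouping expressed as structural recursion on the suffix list
def pvGroupsB (key : String) : List (String × List (String × Int)) → Nat → List (Int × List (String × List (String × Int)))
  | [], _ => []
  | x :: tl, j =>
    if 10 < j then []
    else
      let v := pvVal x.2 key
      let k := 1 + pvRunLen key v tl
      ((j : Int) + 1, (x :: tl).take (min k (10 - j))) :: pvGroupsB key ((x :: tl).drop k) (j + k)
  termination_by rest _ => rest.length
  decreasing_by simp

-- proof-side: the full chunk decomposition (grouping without the 10-cutoff), rank = start position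
def pvChunks (key : String) : List (String × List (String × Int)) → Int → List (Int × List (String × List (String × Int)))
  | [], _ => []
  | x :: tl, pos =>
    let v := pvVal x.2 key
    let k := 1 + pvRunLen key v tl
    (pos, (x :: tl).take k) :: pvChunks key ((x :: tl).drop k) (pos + (k : Int))
  termination_by rest _ => rest.length
  decreasing_by simp

theorem pvRunLen_take (key : String) (v : Int) (tl : List (String × List (String × Int))) :
    tl.take (pvRunLen key v tl) = tl.takeWhile (fun y => decide (pvVal y.2 key = v)) := by
  induction tl with
  | nil => simp [pvRunLen]
  | cons x tl ih =>
    by_cases h : pvVal x.2 key = v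
    · rw [pvRunLen, if_pos h, Nat.add_comm, List.take_succ_cons, ih, List.takeWhile_cons]
      simp [h]
    · simp [pvRunLen, h]

theorem pvRunLen_drop (key : String) (v : Int) (tl : List (String × List (String × Int))) :
    tl.drop (pvRunLen key v tl) = tl.dropWhile (fun y => decide (pvVal y.2 key = v)) := by
  induction tl with
  | nil => simp [pvRunLen]
  | cons x tl ih =>
    by_cases h : pvVal x.2 key = v
    · rw [pvRunLen, if_pos h, Nat.add_comm, List.drop_succ_cons, ih, List.dropWhile_cons]
      simp [h]
    · simp [pvRunLen, h]

theorem pvRunLen_le (key : String) (v : Int) (tl : List (String × List (String × Int))) :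
    pvRunLen key v tl ≤ tl.length := by
  induction tl with
  | nil => simp [pvRunLen]
  | cons x tl ih =>
    by_cases h : pvVal x.2 key = v <;> simp [pvRunLen, h] <;> omega

theorem pvRunLen_eq_length_takeWhile (key : String) (v : Int) (tl : List (String × List (String × Int))) :
    pvRunLen key v tl = (tl.takeWhile (fun y => decide (pvVal y.2 key = v))).length := by
  induction tl with
  | nil => simp [pvRunLen]
  | cons x tl ih =>
    by_cases h : pvVal x.2 key = v
    · simp [pvRunLen, h, List.takeWhile_cons, ih]
      omega
    · simp [pvRunLen, h]

theorem pvAppendLast_append (acc : List (Int × List (String × List (String × Int)))) (r : Int)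
    (g : List (String × List (String × Int))) (it : String × List (String × Int)) :
    pvAppendLast (acc ++ [(r, g)]) it = acc ++ [(r, g ++ [it])] := by
  induction acc with
  | nil => rfl
  | cons a acc ih =>
    cases acc with
    | nil => simp [pvAppendLast]
    | cons b acc => simpa [pvAppendLast] using ih

-- unfolding of pvChunks on a cons, with takeWhile/dropWhile
theorem pvChunks_cons (key : String) (x : String × List (String × Int))
    (tl : List (String × List (String × Int))) (pos : Int) :
    pvChunks key (x :: tl) pos =
      (pos, x :: tl.takeWhile (fun y => decide (pvVal y.2 key = pvVal x.2 key))) ::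
        pvChunks key (tl.dropWhile (fun y => decide (pvVal y.2 key = pvVal x.2 key)))
          (pos + 1 + ((tl.takeWhile (fun y => decide (pvVal y.2 key = pvVal x.2 key))).length : Int)) := by
  have h0 : pvChunks key (x :: tl) pos =
      (pos, (x :: tl).take (1 + pvRunLen key (pvVal x.2 key) tl)) ::
        pvChunks key ((x :: tl).drop (1 + pvRunLen key (pvVal x.2 key) tl))
          (pos + ((1 + pvRunLen key (pvVal x.2 key) tl : Nat) : Int)) := by
    rw [pvChunks.eq_def]
  rw [h0, Nat.add_comm 1 (pvRunLen key (pvVal x.2 key) tl), List.take_succ_cons,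
    List.drop_succ_cons, pvRunLen_take, pvRunLen_drop, pvRunLen_eq_length_takeWhile]
  congr 1
  push_cast
  ring

-- characterisation of A's for-loop once the first item has been processed
theorem pvLoopA_char (key : String) (xs : List (String × List (String × Int))) :
    ∀ (acc : List (Int × List (String × List (String × Int)))) (r : Int)
      (g : List (String × List (String × Int))) (p cr pos : Int),
    (List.foldl (pvStepA key) (acc ++ [(r, g)], some p, cr, pos) xs).1 =
      acc ++ (r, g ++ xs.takeWhile (fun y => decide (pvVal y.2 key = p))) ::
        pvChunks key (xs.dropWhile (fun y => decide (pvVal y.2 key = p)))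
          (pos + ((xs.takeWhile (fun y => decide (pvVal y.2 key = p))).length : Int)) := by
  induction xs with
  | nil => intro acc r g p cr pos; simp [pvChunks.eq_def]
  | cons x xs ih =>
    intro acc r g p cr pos
    by_cases h : pvVal x.2 key = p
    · have hstep : pvStepA key (acc ++ [(r, g)], some p, cr, pos) x =
          (acc ++ [(r, g ++ [x])], some p, cr, pos + 1) := by
        simp [pvStepA, h, pvAppendLast_append]
      rw [List.foldl_cons, hstep, ih]
      simp only [List.takeWhile_cons, List.dropWhile_cons, h, decide_true, if_pos,
        List.length_cons, List.append_assoc, List.singleton_append]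
      congr 2
      push_cast
      ring
    · have hstep : pvStepA key (acc ++ [(r, g)], some p, cr, pos) x =
          ((acc ++ [(r, g)]) ++ [(pos, [x])], some (pvVal x.2 key), pos, pos + 1) := by
        simp [pvStepA, h]
      rw [List.foldl_cons, hstep, ih]
      simp only [List.takeWhile_cons, List.dropWhile_cons, h, decide_false]
      simp [pvChunks_cons]

-- A's rankings list is exactly the chunk decomposition with rank = start position
theorem pvRankings_eq (key : String) (s : List (String × List (String × Int))) :
    (s.foldl (pvStepA key) ([], none, 1, 1)).1 = pvChunks key s 1 := by
  cases s with
  | nil => simp [pvChunks.eq_def]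
  | cons x tl =>
    have hstep : pvStepA key (([], none, 1, 1) :
        List (Int × List (String × List (String × Int))) × Option Int × Int × Int) x =
        ([(1, [x])], some (pvVal x.2 key), 1, 2) := by
      simp [pvStepA]
    rw [List.foldl_cons, hstep]
    have := pvLoopA_char key tl [] 1 [x] (pvVal x.2 key) 1 2
    simp only [List.nil_append] at this
    rw [this, pvChunks_cons]
    norm_num

theorem pvGroupsB_of_gt (key : String) (s : List (String × List (String × Int))) (j : Nat)
    (h : 10 < j) : pvGroupsB key s j = [] := by
  cases s with
  | nil => rw [pvGroupsB.eq_def]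
  | cons x tl => rw [pvGroupsB.eq_def]; simp [h]

theorem pvChunks_cons' (key : String) (x : String × List (String × Int))
    (tl : List (String × List (String × Int))) (pos : Int) :
    pvChunks key (x :: tl) pos =
      (pos, (x :: tl).take (1 + pvRunLen key (pvVal x.2 key) tl)) ::
        pvChunks key ((x :: tl).drop (1 + pvRunLen key (pvVal x.2 key) tl))
          (pos + ((1 + pvRunLen key (pvVal x.2 key) tl : Nat) : Int)) := by
  rw [pvChunks.eq_def]

theorem pvGroupsB_cons (key : String) (x : String × List (String × Int))
    (tl : List (String × List (String × Int))) (j : Nat) (hj : ¬ 10 < j) :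
    pvGroupsB key (x :: tl) j =
      ((j : Int) + 1, (x :: tl).take (min (1 + pvRunLen key (pvVal x.2 key) tl) (10 - j))) ::
        pvGroupsB key ((x :: tl).drop (1 + pvRunLen key (pvVal x.2 key) tl))
          (j + (1 + pvRunLen key (pvVal x.2 key) tl)) := by
  rw [pvGroupsB.eq_def]; simp [hj]

-- A's truncation of the chunk list is the cut-off grouping
theorem pvTrunc_eq (key : String) : ∀ (n : Nat) (s : List (String × List (String × Int))) (j : Nat),
    s.length ≤ n → j ≤ 10 →
    pvTruncA (pvChunks key s ((j : Int) + 1)) (j : Int) = pvGroupsB key s j := by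
  intro n
  induction n with
  | zero =>
    intro s j hs _
    have : s = [] := List.eq_nil_of_length_eq_zero (Nat.le_zero.mp hs)
    subst this
    rw [pvChunks.eq_def, pvGroupsB.eq_def]
    rfl
  | succ n ih =>
    intro s j hs hj
    cases s with
    | nil => rw [pvChunks.eq_def, pvGroupsB.eq_def]; rfl
    | cons x tl =>
      rw [pvChunks_cons', pvGroupsB_cons key x tl j (by omega)]
      have hrl := pvRunLen_le key (pvVal x.2 key) tl
      generalize hk : 1 + pvRunLen key (pvVal x.2 key) tl = k
      have hk1 : 1 ≤ k := by omega
      have hkle : k ≤ tl.length + 1 := by omega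
      have hlen : ((x :: tl).take k).length = k := by rw [List.length_take]; simp; omega
      rw [pvTruncA, hlen]
      by_cases hcut : 10 < j + k
      · rw [if_pos (by omega : (j : Int) + (k : Int) > 10)]
        have h10 : (10 - (j : Int)).toNat = 10 - j := by omega
        rw [PySem.List.slice_to _ (by omega : (0:Int) ≤ 10 - (j : Int)), h10, List.take_take,
          Nat.min_comm, pvGroupsB_of_gt key _ _ hcut]
      · rw [if_neg (by omega : ¬ ((j : Int) + (k : Int) > 10))]
        rw [show min k (10 - j) = k from by omega]
        congr 1
        have hrec := ih ((x :: tl).drop k) (j + k)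
          (by rw [List.length_drop]; simp only [List.length_cons] at hs ⊢; omega) (by omega)
        rw [show ((j : Int) + 1 + (k : Int)) = (((j + k : Nat) : Int) + 1) from by push_cast; ring,
          show ((j : Int) + (k : Int)) = ((j + k : Nat) : Int) from by push_cast; ring]
        exact hrec

-- pvScan computes start + run length of the equal-value run
theorem pvScan_eq (key : String) (order : List (String × List (String × Int))) (v : Int) :
    ∀ (m j : Nat), order.length - j ≤ m →
    pvScan key order v j = j + pvRunLen key v (order.drop j) := by
  intro m
  induction m with
  | zero =>
    intro j hm
    have hj : order.length ≤ j := by omega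
    rw [pvScan, dif_neg (by omega), List.drop_eq_nil_of_le hj, pvRunLen]
    omega
  | succ m ih =>
    intro j hm
    by_cases h : j < order.length
    · have hdrop : order.drop j = order[j] :: order.drop (j + 1) := List.drop_eq_getElem_cons h
      rw [pvScan, dif_pos h, hdrop, pvRunLen]
      by_cases hv : pvVal (order[j]).2 key = v
      · rw [if_pos hv, if_pos hv, ih (j + 1) (by omega)]
        omega
      · rw [if_neg hv, if_neg hv]
        omega
    · rw [pvScan, dif_neg h, List.drop_eq_nil_of_le (by omega), pvRunLen]
      omega

-- B's index loop equals the suffix-list grouping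
theorem pvLoopB_eq_groups (key : String) (order : List (String × List (String × Int))) :
    ∀ (m i : Nat), order.length - i ≤ m → i ≤ 10 →
    pvLoopB key order i = pvGroupsB key (order.drop i) i := by
  intro m
  induction m with
  | zero =>
    intro i hm _
    have hi : order.length ≤ i := by omega
    rw [pvLoopB, dif_neg (by omega)]
    rw [List.drop_eq_nil_of_le hi]
    rw [pvGroupsB.eq_def]
  | succ m ih =>
    intro i hm hi
    by_cases h : i < order.length
    · have hdrop : order.drop i = order[i] :: order.drop (i + 1) := List.drop_eq_getElem_cons h
      set v := pvVal (order[i]).2 key with hv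
      set k := 1 + pvRunLen key v (order.drop (i + 1)) with hk
      have hscan : pvScan key order v (i + 1) = i + k := by
        rw [pvScan_eq key order v (order.length - (i + 1)) (i + 1) (le_refl _)]
        omega
      have hgb := pvGroupsB_cons key (order[i]) (order.drop (i + 1)) i (by omega)
      rw [hdrop, hgb, ← hv, ← hk]
      have hdropk : (order[i] :: order.drop (i + 1)).drop k = order.drop (i + k) := by
        rw [← hdrop, List.drop_drop]
      rw [pvLoopB, dif_pos h]
      simp only [← hv, hscan]
      by_cases hle : i + k ≤ 10
      · rw [if_pos hle]
        have hmin : min k (10 - i) = k := by omega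
        rw [hmin, hdropk, ih (i + k) (by omega) (by omega)]
        have : i + k - i = k := by omega
        rw [this, hdrop]
      · rw [if_neg hle]
        have hmin : min k (10 - i) = 10 - i := by omega
        rw [hmin, hdropk, pvGroupsB_of_gt key _ _ (by omega), hdrop]
    · rw [pvLoopB, dif_neg h, List.drop_eq_nil_of_le (by omega), pvGroupsB.eq_def]

-- ===== VERDICT (by name: the statement is the Claim_ definition above) =====
theorem generate_competitive_ranking_spec : Claim_equal_generate_competitive_ranking := by
  intro data key _ _
  unfold Spec_generate_competitive_ranking generate_competitive_ranking generate_competitive_ranking_alt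
  set s := PySem.List.sorted2 data (fun x => -(pvVal x.2 key)) (fun x => x.1) with hs
  simp only
  rw [pvRankings_eq]
  rw [pvLoopB_eq_groups key s s.length 0 (by omega) (by omega), List.drop_zero]
  have := pvTrunc_eq key s.length s 0 (le_refl _) (by omega)
  simpa using this
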